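-- pv_equiv track=rewrite | github.com/tchannagiri/DSBplot | src/DSBplot/lib_process/alignment_window.py | get_alignment_window
-- ===== SOURCE A (Python) =====
-- def get_alignment_window(
--   ref_align,
--   read_align,
--   dsb_pos,
--   window_size,
--   anchor_size,
--   anchor_substs,
--   anchor_indels,
-- ):
--   """
--     Get the part of the alignment in a window around the DSB.
--
--     Parameters
--     ----------
--     ref_align: the reference sequence alignment.
--     read_align: the read sequence alignment.
--     dsb_pos: the 1-based DSB position on the reference.
--     window_size: size of the window to extract.
--     anchor_size: the size of the anchors that must match on the left and right of the DSB.
--     anchor_sub: the maximum number of substitutions allowed on the left and right anchors.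
--       The substitution limit is checked separately on the left or right anchors.
--       Check is only enabled if anchor_sub >= 0.
--     anchor_indel: the maximum number of indels allowed on the left and right anchors.
--       The indel limit is checked separately on the left or right anchors.
--       Check is only enabled if anchor_indel >= 0.
--
--     Returns
--     -------
--     A tuple (ref_align, read_align):
--       ref_align: the part of the reference alignment in the window.
--       read_align: the part of the read alignment in the window.
--     If the extraction fails due to too many anchor variations or the read
--     is too short to cross dsb_pos, the tuple (None, None) is returned.
--   """
--
--   ref_i = 1 # index on the original reference sequence
--
--   ref_align_window = ''
--   read_align_window = ''
--
--   window_start = dsb_pos - window_size + 1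
--   window_end = dsb_pos + window_size
--   left_anchor_start = window_start - anchor_size
--   left_anchor_end = window_start - 1
--   right_anchor_start = window_end + 1
--   right_anchor_end = window_end + anchor_size
--
--   left_anchor_sub = 0
--   left_anchor_indel = 0
--   right_anchor_sub = 0
--   right_anchor_indel = 0
--   for i in range(min(len(ref_align), len(read_align))):
--     if ref_i in range(left_anchor_start, left_anchor_end + 1):
--       # Check the sub/in/dels on the left anchor
--       if (ref_align[i] == '-') or (read_align[i] == '-'):
--         left_anchor_indel += 1
--       elif ref_align[i] != read_align[i]:
--         left_anchor_sub += 1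
--     elif ref_i in range(right_anchor_start, right_anchor_end + 1):
--       # Check the sub/in/dels on the right anchor
--       if (ref_align[i] == '-') or (read_align[i] == '-'):
--         right_anchor_indel += 1
--       elif ref_align[i] != read_align[i]:
--         right_anchor_sub += 1
--     elif ref_i in range(window_start, window_end + 1):
--       # obtain the window around the DSB
--       ref_align_window += ref_align[i]
--       read_align_window += read_align[i]
--
--     # increment counters
--     if ref_align[i] != '-':
--       ref_i += 1
--
--     if ref_i > right_anchor_end:
--       break
--
--   if ref_i <= right_anchor_end:
--     # read was not long enough to align across window and anchor
--     return None, None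
--
--   if (
--     ((anchor_substs >= 0) and (left_anchor_sub > anchor_substs)) or
--     ((anchor_indels >= 0) and (left_anchor_indel > anchor_indels)) or
--     ((anchor_substs >= 0) and (right_anchor_sub > anchor_substs)) or
--     ((anchor_indels >= 0) and (right_anchor_indel > anchor_indels))
--   ):
--     return None, None
--
--   return ref_align_window, read_align_window
-- ===== SOURCE B (Python) =====
-- def get_alignment_window(
--   ref_align,
--   read_align,
--   dsb_pos,
--   window_size,
--   anchor_size,
--   anchor_substs,
--   anchor_indels,
-- ):
--   window_start = dsb_pos - window_size + 1
--   window_end = dsb_pos + window_size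
--   left_start = window_start - anchor_size
--   left_end = window_start - 1
--   right_start = window_end + 1
--   right_end = window_end + anchor_size
--
--   # Pass 1: annotate each alignment column with its 1-based reference position.
--   cols = []
--   p = 1
--   for rc, dc in zip(ref_align, read_align):
--     cols.append((p, rc, dc))
--     if rc != '-':
--       p += 1
--
--   # Pass 2: keep only the columns up to where the reference index first passes
--   # the right anchor end; 'final' is the reference index reached at that point.
--   keep = []
--   final = p
--   for q, rc, dc in cols:
--     keep.append((q, rc, dc))
--     nxt = q + (rc != '-')
--     if nxt > right_end:
--       final = nxt
--       break
--
--   if final <= right_end: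
--     # read too short to span the window and right anchor
--     return None, None
--
--   # Pass 3: tally substitutions/indels over each anchor region.
--   ls = li = rs = ri = 0
--   for q, rc, dc in keep:
--     if left_start <= q <= left_end:
--       if rc == '-' or dc == '-':
--         li += 1
--       elif rc != dc:
--         ls += 1
--     elif right_start <= q <= right_end:
--       if rc == '-' or dc == '-':
--         ri += 1
--       elif rc != dc:
--         rs += 1
--
--   if (anchor_substs >= 0 and (ls > anchor_substs or rs > anchor_substs)) or \
--      (anchor_indels >= 0 and (li > anchor_indels or ri > anchor_indels)):
--     return None, None
--
--   # Pass 4: join the window columns.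
--   ref_w = ''.join(rc for q, rc, dc in keep if window_start <= q <= window_end)
--   read_w = ''.join(dc for q, rc, dc in keep if window_start <= q <= window_end)
--   return ref_w, read_w
-- ===== Notes on version B (the rewrite author's own statement) =====
-- stated objective: faster
-- what changed: A's single loop that interleaves per-column classification, anchor tallying, window accumulation via string += and an early break is replaced by a four-pass pipeline: annotate columns with 1-based reference positions, truncate at the first column whose reference index passes the right anchor end, tally the two anchors over the kept columns, and join the window columns with ''.join; the shortness test becomes a comparison of the reached reference index done before any tallying.
import Mathlib
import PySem

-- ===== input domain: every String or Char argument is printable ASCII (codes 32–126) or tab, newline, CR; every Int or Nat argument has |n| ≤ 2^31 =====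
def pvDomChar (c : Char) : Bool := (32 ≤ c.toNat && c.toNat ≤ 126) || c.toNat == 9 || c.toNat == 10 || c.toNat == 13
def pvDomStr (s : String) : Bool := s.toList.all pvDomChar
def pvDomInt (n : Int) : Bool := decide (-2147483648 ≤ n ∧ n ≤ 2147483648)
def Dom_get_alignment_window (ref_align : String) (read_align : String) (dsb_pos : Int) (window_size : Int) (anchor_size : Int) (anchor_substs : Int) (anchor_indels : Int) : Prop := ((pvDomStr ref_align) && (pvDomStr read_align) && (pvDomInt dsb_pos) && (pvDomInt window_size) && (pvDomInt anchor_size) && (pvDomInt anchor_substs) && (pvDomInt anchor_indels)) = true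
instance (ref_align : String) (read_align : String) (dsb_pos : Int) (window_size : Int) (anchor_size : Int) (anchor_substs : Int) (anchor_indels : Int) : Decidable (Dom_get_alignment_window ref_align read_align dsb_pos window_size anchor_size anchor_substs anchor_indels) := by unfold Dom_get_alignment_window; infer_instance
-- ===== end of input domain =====

-- B replaces A's single interleaved loop (classify / tally / build window / break) by a
-- four-pass pipeline: annotate columns with reference positions, truncate at the right
-- anchor end, tally anchors, then join the window columns (objective: faster; a timing run measured B faster).

-- ===== PORT A =====
-- A's single loop over the zipped alignment columns, state
-- (ref_i, ref_window, read_window, left_sub, left_indel, right_sub, right_indel),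
-- with the early break once ref_i passes right_anchor_end.
def pvALoop (las lae ras rae ws we : Int) :
    List (Char × Char) → Int → List Char → List Char → Int → Int → Int → Int →
    Int × List Char × List Char × Int × Int × Int × Int
  | [], refi, rw, dw, ls, li, rs, ri => (refi, rw, dw, ls, li, rs, ri)
  | (rc, dc) :: rest, refi, rw, dw, ls, li, rs, ri =>
    let st :=
      if las ≤ refi ∧ refi ≤ lae then
        (if rc = '-' ∨ dc = '-' then (rw, dw, ls, li + 1, rs, ri)
         else if rc ≠ dc then (rw, dw, ls + 1, li, rs, ri)
         else (rw, dw, ls, li, rs, ri))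
      else if ras ≤ refi ∧ refi ≤ rae then
        (if rc = '-' ∨ dc = '-' then (rw, dw, ls, li, rs, ri + 1)
         else if rc ≠ dc then (rw, dw, ls, li, rs + 1, ri)
         else (rw, dw, ls, li, rs, ri))
      else if ws ≤ refi ∧ refi ≤ we then
        (rw ++ [rc], dw ++ [dc], ls, li, rs, ri)
      else (rw, dw, ls, li, rs, ri)
    let refi' := if rc ≠ '-' then refi + 1 else refi
    if refi' > rae then (refi', st)
    else pvALoop las lae ras rae ws we rest refi' st.1 st.2.1 st.2.2.1 st.2.2.2.1 st.2.2.2.2.1 st.2.2.2.2.2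

def get_alignment_window (ref_align : String) (read_align : String) (dsb_pos : Int) (window_size : Int) (anchor_size : Int) (anchor_substs : Int) (anchor_indels : Int) : Option String × Option String :=
  let window_start := dsb_pos - window_size + 1
  let window_end := dsb_pos + window_size
  let left_anchor_start := window_start - anchor_size
  let left_anchor_end := window_start - 1
  let right_anchor_start := window_end + 1
  let right_anchor_end := window_end + anchor_size
  let r := pvALoop left_anchor_start left_anchor_end right_anchor_start right_anchor_end
            window_start window_end (ref_align.toList.zip read_align.toList) 1 [] [] 0 0 0 0
  if r.1 ≤ right_anchor_end then (none, none)
  else if (anchor_substs ≥ 0 ∧ r.2.2.2.1 > anchor_substs) ∨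
          (anchor_indels ≥ 0 ∧ r.2.2.2.2.1 > anchor_indels) ∨
          (anchor_substs ≥ 0 ∧ r.2.2.2.2.2.1 > anchor_substs) ∨
          (anchor_indels ≥ 0 ∧ r.2.2.2.2.2.2 > anchor_indels) then (none, none)
  else (some (String.ofList r.2.1), some (String.ofList r.2.2.1))

-- ===== PORT B =====
-- Pass 1: annotate each column with its 1-based reference position; also return the final p.
def pvAnnot : List (Char × Char) → Int → List (Int × Char × Char) × Int
  | [], p => ([], p)
  | (rc, dc) :: rest, p =>
    let r := pvAnnot rest (if rc ≠ '-' then p + 1 else p)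
    ((p, rc, dc) :: r.1, r.2)

-- Pass 2: keep columns up to where the reference index first passes right_end;
-- second component is the reference index reached at that point.
def pvKeep (rae : Int) : List (Int × Char × Char) → Int → List (Int × Char × Char) × Int
  | [], fin => ([], fin)
  | (q, rc, dc) :: rest, fin =>
    let nxt := q + (if rc ≠ '-' then 1 else 0)
    if nxt > rae then ([(q, rc, dc)], nxt)
    else
      let r := pvKeep rae rest fin
      ((q, rc, dc) :: r.1, r.2)

-- Pass 3: one tally step of Source B's anchor loop.
def pvTallyStep (las lae ras rae : Int) (t : Int × Int × Int × Int) (x : Int × Char × Char) :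
    Int × Int × Int × Int :=
  if las ≤ x.1 ∧ x.1 ≤ lae then
    (if x.2.1 = '-' ∨ x.2.2 = '-' then (t.1, t.2.1 + 1, t.2.2.1, t.2.2.2)
     else if x.2.1 ≠ x.2.2 then (t.1 + 1, t.2.1, t.2.2.1, t.2.2.2)
     else t)
  else if ras ≤ x.1 ∧ x.1 ≤ rae then
    (if x.2.1 = '-' ∨ x.2.2 = '-' then (t.1, t.2.1, t.2.2.1, t.2.2.2 + 1)
     else if x.2.1 ≠ x.2.2 then (t.1, t.2.1, t.2.2.1 + 1, t.2.2.2)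
     else t)
  else t

def get_alignment_window_alt (ref_align : String) (read_align : String) (dsb_pos : Int) (window_size : Int) (anchor_size : Int) (anchor_substs : Int) (anchor_indels : Int) : Option String × Option String :=
  let window_start := dsb_pos - window_size + 1
  let window_end := dsb_pos + window_size
  let left_start := window_start - anchor_size
  let left_end := window_start - 1
  let right_start := window_end + 1
  let right_end := window_end + anchor_size
  let a := pvAnnot (ref_align.toList.zip read_align.toList) 1
  let k := pvKeep right_end a.1 a.2
  if k.2 ≤ right_end then (none, none)
  else
    let t := k.1.foldl (pvTallyStep left_start left_end right_start right_end) (0, 0, 0, 0)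
    if (anchor_substs ≥ 0 ∧ (t.1 > anchor_substs ∨ t.2.2.1 > anchor_substs)) ∨
       (anchor_indels ≥ 0 ∧ (t.2.1 > anchor_indels ∨ t.2.2.2 > anchor_indels)) then (none, none)
    else
      let win := k.1.filter (fun x => decide (window_start ≤ x.1 ∧ x.1 ≤ window_end))
      (some (String.ofList (win.map (fun x => x.2.1))), some (String.ofList (win.map (fun x => x.2.2))))

-- ===== PRECONDITION & SPEC =====
def Spec_get_alignment_window (ref_align : String) (read_align : String) (dsb_pos : Int) (window_size : Int) (anchor_size : Int) (anchor_substs : Int) (anchor_indels : Int) (out : Option String × Option String) : Prop := out = get_alignment_window_alt ref_align read_align dsb_pos window_size anchor_size anchor_substs anchor_indels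
instance (ref_align : String) (read_align : String) (dsb_pos : Int) (window_size : Int) (anchor_size : Int) (anchor_substs : Int) (anchor_indels : Int) (out : Option String × Option String) : Decidable (Spec_get_alignment_window ref_align read_align dsb_pos window_size anchor_size anchor_substs anchor_indels out) := by unfold Spec_get_alignment_window; infer_instance

-- ===== CLAIM (what is proved, stated in full; the proofs are below) =====
def Claim_equal_get_alignment_window : Prop := ∀ (ref_align : String) (read_align : String) (dsb_pos : Int) (window_size : Int) (anchor_size : Int) (anchor_substs : Int) (anchor_indels : Int), Dom_get_alignment_window ref_align read_align dsb_pos window_size anchor_size anchor_substs anchor_indels → Spec_get_alignment_window ref_align read_align dsb_pos window_size anchor_size anchor_substs anchor_indels (get_alignment_window ref_align read_align dsb_pos window_size anchor_size anchor_substs anchor_indels)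

-- ===== LEMMAS AND PROOFS =====

-- A's loop equals B's pipeline: the truncated annotated columns determine the final
-- reference index, the window strings, and the tallies.  The hypotheses lae < ws and
-- we < ras (true for A's concrete region bounds) make the window disjoint from both anchors.
set_option maxHeartbeats 1000000 in
lemma pvALoop_eq (las lae ras rae ws we : Int) (hl : lae < ws) (hr : we < ras) :
    ∀ (cols : List (Char × Char)) (p : Int) (rw dw : List Char) (ls li rs ri : Int),
      pvALoop las lae ras rae ws we cols p rw dw ls li rs ri =
        (let a := pvAnnot cols p
         let k := pvKeep rae a.1 a.2
         let win := k.1.filter (fun x => decide (ws ≤ x.1 ∧ x.1 ≤ we))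
         (k.2, rw ++ win.map (fun x => x.2.1), dw ++ win.map (fun x => x.2.2),
          k.1.foldl (pvTallyStep las lae ras rae) (ls, li, rs, ri))) := by
  intro cols
  induction cols with
  | nil => intro p rw dw ls li rs ri; simp [pvALoop, pvAnnot, pvKeep]
  | cons hd rest ih =>
    intro p rw dw ls li rs ri
    obtain ⟨rc, dc⟩ := hd
    simp only [pvALoop, pvAnnot, pvKeep]
    have hn : p + (if rc ≠ '-' then (1:Int) else 0) = (if rc ≠ '-' then p + 1 else p) := by
      split <;> ring
    rw [hn]
    by_cases hb : (if rc ≠ '-' then p + 1 else p) > rae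
    · rw [if_pos hb, if_pos hb]
      simp only [List.filter_cons, List.filter_nil, List.foldl_cons, List.foldl_nil,
        pvTallyStep]
      split_ifs <;>
        first
          | (simp_all; done)
          | (simp_all; omega)
          | (simp only [decide_eq_true_eq] at *; tauto)
    · rw [if_neg hb, if_neg hb, ih]
      simp only [List.filter_cons, List.foldl_cons, pvTallyStep]
      split_ifs <;>
        first
          | (simp_all; done)
          | (simp_all; omega)
          | (simp only [decide_eq_true_eq] at *; tauto)

-- ===== VERDICT (by name: the statement is the Claim_ definition above) =====
set_option maxHeartbeats 2000000 in
theorem get_alignment_window_spec : Claim_equal_get_alignment_window := by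
  intro ref_align read_align dsb_pos window_size anchor_size anchor_substs anchor_indels _
  unfold Spec_get_alignment_window
  unfold get_alignment_window get_alignment_window_alt
  dsimp only
  rw [pvALoop_eq _ _ _ _ _ _ (by omega) (by omega)]
  simp only [List.nil_append]
  split_ifs <;> first | rfl | tauto
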